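-- pv_equiv track=rewrite | github.com/bananagobananza/CrackMe | 1.0-1.9/keygenme_2_by_nicohogtag by nicohogtag/Solve.py | calculate_serial
-- ===== SOURCE A (Python) =====
-- def calculate_serial(username):
--     v8 = 0
--     v7 = 0x80899
--
--     # Sum up to the first 10 characters of the username
--     for i in range(min(len(username), 10)):
--         v8 += ord(username[i])
--         v7 += v8
--
--     v6 = (7 * (v8 + v7) - v8 + 13 * (v7 // 2)) * 7 * (v8 + v7)
--     if v6 < 0:
--         v6 = -v6
--
--     return v6 & 0xFFFFFFFF
-- ===== SOURCE B (Python) =====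
-- def calculate_serial(username):
--     head = username[:10]
--     m = len(head)
--     v8 = sum(ord(c) for c in head)
--     v7 = 0x80899 + sum(ord(c) * (m - k) for k, c in enumerate(head))
--     v6 = (7 * (v8 + v7) - v8 + 13 * (v7 // 2)) * 7 * (v8 + v7)
--     return abs(v6) & 0xFFFFFFFF
-- ===== Notes on version B (the rewrite author's own statement) =====
-- stated objective: simpler
-- what changed: Replaces A's coupled running accumulators (v8 summed into v7 each iteration) by two independent closed-form sums over the first min(len,10) characters: the plain sum of codes and a weighted sum ord(c)*(m-k), then applies the same final arithmetic.
import Mathlib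
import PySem

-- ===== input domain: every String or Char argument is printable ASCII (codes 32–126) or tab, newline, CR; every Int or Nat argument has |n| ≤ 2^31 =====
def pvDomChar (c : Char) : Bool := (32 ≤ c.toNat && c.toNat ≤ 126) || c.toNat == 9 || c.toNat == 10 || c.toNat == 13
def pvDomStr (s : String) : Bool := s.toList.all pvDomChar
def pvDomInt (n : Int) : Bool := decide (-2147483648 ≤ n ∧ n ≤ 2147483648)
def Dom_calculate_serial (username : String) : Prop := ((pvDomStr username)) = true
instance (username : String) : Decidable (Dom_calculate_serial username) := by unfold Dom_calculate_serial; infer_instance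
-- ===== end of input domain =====

-- B replaces A's pair of running accumulators (v8, v7) by two direct closed-form sums over
-- the first ≤10 characters: v8 is the plain sum of codes, v7 adds each code weighted by (m−k);
-- objective: simpler.

-- ===== PORT A =====
-- for i in range(min(len(username),10)): v8 += ord(username[i]); v7 += v8
-- pyGetD's default is never hit: every index of the range is < min(len, 10) ≤ len.
-- v6 & 0xFFFFFFFF is ported as % 4294967296, exact because v6 ≥ 0 after the abs branch.
def calculate_serial (username : String) : Int :=
  let cs := username.toList
  let st := (PySem.List.pyRange 0 (min cs.length 10 : Nat) 1).foldl
    (fun (p : Int × Int) i =>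
      (p.1 + ((PySem.List.pyGetD cs i ' ').toNat : Int),
       p.2 + (p.1 + ((PySem.List.pyGetD cs i ' ').toNat : Int)))) (0, 0x80899)
  let v6 := (7 * (st.1 + st.2) - st.1 + 13 * (PySem.Int.floordiv st.2 2)) * 7 * (st.1 + st.2)
  let v6 := if v6 < 0 then -v6 else v6
  v6 % 4294967296

-- ===== PORT B =====
-- abs(v6) & 0xFFFFFFFF ported as % 4294967296, exact since abs(v6) ≥ 0.
def calculate_serial_alt (username : String) : Int :=
  let head := PySem.List.slice username.toList none (some ((10 : Nat) : Int))
  let m : Int := head.length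
  let v8 : Int := (head.map (fun c => (c.toNat : Int))).sum
  let v7 : Int := 0x80899 +
    ((PySem.List.enumerate head).map (fun p => ((p.2.toNat : Int)) * (m - p.1))).sum
  let v6 := (7 * (v8 + v7) - v8 + 13 * (PySem.Int.floordiv v7 2)) * 7 * (v8 + v7)
  |v6| % 4294967296

-- ===== PRECONDITION & SPEC =====
def Spec_calculate_serial (username : String) (out : Int) : Prop := out = calculate_serial_alt username
instance (username : String) (out : Int) : Decidable (Spec_calculate_serial username out) := by unfold Spec_calculate_serial; infer_instance

-- ===== CLAIM (what is proved, stated in full; the proofs are below) =====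
def Claim_equal_calculate_serial : Prop := ∀ (username : String), Dom_calculate_serial username → Spec_calculate_serial username (calculate_serial username)

-- ===== LEMMAS AND PROOFS =====

-- plain sum of character codes
def pvS (t : List Char) : Int := (t.map (fun c => (c.toNat : Int))).sum

-- weighted sum Σ ord(t_k)·(n − k)
def pvW (t : List Char) (n : Int) : Int :=
  ((PySem.List.enumerate t).map (fun p => ((p.2.toNat : Int)) * (n - p.1))).sum

lemma pvW_shift (t : List Char) (s n : Int) :
    ((PySem.List.enumerate t s).map (fun p => ((p.2.toNat : Int)) * (n - p.1))).sum
      = pvW t (n - s) := by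
  induction t generalizing s n with
  | nil => simp [pvW, PySem.List.enumerate]
  | cons c t ih =>
    simp only [pvW, PySem.List.enumerate_cons, List.map_cons, List.sum_cons]
    rw [ih, ih]
    have e1 : n - (s + 1) = n - s - (0 + 1) := by ring
    rw [e1]
    ring_nf

lemma pvW_cons (c : Char) (t : List Char) (n : Int) :
    pvW (c :: t) n = (c.toNat : Int) * n + pvW t (n - 1) := by
  rw [pvW]
  simp only [PySem.List.enumerate_cons, List.map_cons, List.sum_cons]
  rw [pvW_shift]
  ring_nf

lemma pvS_cons (c : Char) (t : List Char) : pvS (c :: t) = (c.toNat : Int) + pvS t := by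
  simp [pvS]

-- the fold A performs over the character list, characterised in closed form
lemma pvFold (t : List Char) (a b : Int) :
    t.foldl (fun (p : Int × Int) c =>
        (p.1 + ((c.toNat : Int)), p.2 + (p.1 + ((c.toNat : Int))))) (a, b)
      = (a + pvS t, b + (t.length : Int) * a + pvW t (t.length : Int)) := by
  induction t generalizing a b with
  | nil => simp [pvS, pvW, PySem.List.enumerate]
  | cons c t ih =>
    simp only [List.foldl_cons]
    rw [ih, pvS_cons, pvW_cons]
    simp only [List.length_cons, Prod.mk.injEq]
    constructor
    · ring
    · push_cast
      have e : ((t.length : Int) + 1 - 1) = (t.length : Int) := by ring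
      rw [e]
      ring

-- closed form for A's loop: state (pvS of the first-10 prefix, 0x80899 + its weighted sum)
lemma pvLoopA (cs : List Char) :
    (PySem.List.pyRange 0 ((min cs.length 10 : Nat) : Int) 1).foldl
      (fun (p : Int × Int) i =>
        (p.1 + ((PySem.List.pyGetD cs i ' ').toNat : Int),
         p.2 + (p.1 + ((PySem.List.pyGetD cs i ' ').toNat : Int)))) (0, 0x80899)
    = (pvS (cs.take 10),
       0x80899 + pvW (cs.take 10) (((cs.take 10).length : Nat) : Int)) := by
  set t := cs.take 10 with ht
  have hm : min cs.length 10 = t.length := by simp [ht, Nat.min_comm]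
  rw [hm]
  have hcong : (PySem.List.pyRange 0 ((t.length : Nat) : Int) 1).foldl
      (fun (p : Int × Int) i =>
        (p.1 + ((PySem.List.pyGetD cs i ' ').toNat : Int),
         p.2 + (p.1 + ((PySem.List.pyGetD cs i ' ').toNat : Int)))) (0, 0x80899)
      = (PySem.List.pyRange 0 ((t.length : Nat) : Int) 1).foldl
      (fun (p : Int × Int) i =>
        (p.1 + ((PySem.List.pyGetD t i ' ').toNat : Int),
         p.2 + (p.1 + ((PySem.List.pyGetD t i ' ').toNat : Int)))) (0, 0x80899) := by
    refine PySem.List.foldl_congr_mem _ _ _ _ (fun acc x hx => ?_)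
    have hx' := (PySem.List.mem_pyRange_one).mp hx
    have hlt : x < (t.length : Int) := hx'.2
    have h0 : (0 : Int) ≤ x := hx'.1
    have hlen : t.length ≤ cs.length := by simp [ht]
    have hget : PySem.List.pyGetD cs x ' ' = PySem.List.pyGetD t x ' ' := by
      rw [PySem.List.pyGetD_eq_getElem cs ' ' h0 (by exact_mod_cast by omega : x < (cs.length : Int)),
          PySem.List.pyGetD_eq_getElem t ' ' h0 hlt]
      exact (List.getElem_take).symm
    rw [hget]
  rw [hcong, PySem.List.foldl_pyRange_zero_pyGetD' t ' '
        (fun (p : Int × Int) c =>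
          (p.1 + ((c.toNat : Int)), p.2 + (p.1 + ((c.toNat : Int))))) (0, 0x80899),
      pvFold]
  simp

lemma pvAbs (x : Int) : (if x < 0 then -x else x) = |x| := by
  rcases lt_or_ge x 0 with h | h
  · simp [h, abs_of_neg h]
  · simp [not_lt.mpr h, abs_of_nonneg h]

-- ===== VERDICT (by name: the statement is the Claim_ definition above) =====
theorem calculate_serial_spec : Claim_equal_calculate_serial := by
  intro username _
  unfold Spec_calculate_serial calculate_serial calculate_serial_alt
  simp only [PySem.List.slice_to_natCast, pvLoopA, pvAbs, pvS, pvW]
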